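-- pv_equiv track=rewrite | github.com/pc5401/my_BOJ | 백준/Silver/1411. 비슷한 단어/비슷한 단어.py | solve
-- ===== SOURCE A (Python) =====
-- def solve(N, words):
--     def pattern(s):
--         mp = {}
--         nxt = 0
--         seq = []
--         for ch in s:
--             if ch not in mp:
--                 mp[ch] = nxt
--                 nxt += 1
--             seq.append(mp[ch])
--         return tuple(seq)
--
--     cnt = {}
--     for w in words:
--         key = pattern(w)
--         cnt[key] = cnt.get(key, 0) + 1
--
--     result = 0
--     for c in cnt.values():
--         result += c * (c - 1) // 2
--     return result
-- ===== SOURCE B (Python) =====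
-- def solve(N, words):
--     # B: same pattern canonicalization, but counts equal-pattern pairs by direct
--     # pairwise comparison of precomputed patterns instead of dict grouping + C(c,2).
--     def pattern(s):
--         mp = {}
--         nxt = 0
--         seq = []
--         for ch in s:
--             if ch not in mp:
--                 mp[ch] = nxt
--                 nxt += 1
--             seq.append(mp[ch])
--         return tuple(seq)
--
--     rest = [pattern(w) for w in words]
--     result = 0
--     while rest:
--         head, rest = rest[0], rest[1:]
--         for q in rest:
--             if q == head:
--                 result += 1
--     return result
-- ===== Notes on version B (the rewrite author's own statement) =====
-- stated objective: alternative
-- what changed: Replaced the dict-grouping of patterns plus the c*(c-1)//2 closed-form count with direct pairwise comparison: precompute each word's pattern, then for each pattern compare it against every later pattern and count matches.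
import Mathlib
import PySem

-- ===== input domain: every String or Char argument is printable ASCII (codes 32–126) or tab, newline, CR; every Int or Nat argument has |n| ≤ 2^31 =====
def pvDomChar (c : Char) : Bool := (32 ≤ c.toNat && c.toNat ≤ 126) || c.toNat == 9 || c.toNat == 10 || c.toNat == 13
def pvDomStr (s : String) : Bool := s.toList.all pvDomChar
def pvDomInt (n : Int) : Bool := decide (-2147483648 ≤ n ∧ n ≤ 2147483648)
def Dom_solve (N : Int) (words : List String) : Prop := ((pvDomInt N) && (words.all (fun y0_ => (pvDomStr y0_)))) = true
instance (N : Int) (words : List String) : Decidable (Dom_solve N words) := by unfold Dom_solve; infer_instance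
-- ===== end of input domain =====

-- B replaces A's dict-grouping + c*(c-1)//2 closed form by direct pairwise comparison of
-- precomputed patterns (same result, different algorithm; not faster).

-- ===== PORT A =====
-- shared inner helper: Python's nested `pattern(s)` (identical in Source A and Source B)
def pattern (s : String) : List Int :=
  (s.toList.foldl
    (fun (st : PySem.Dict Char Int × Int × List Int) ch =>
      let mp := st.1
      let nxt := st.2.1
      let seq := st.2.2
      let (mp, nxt) := if ¬ mp.contains ch then (mp.insert ch nxt, nxt + 1) else (mp, nxt)
      (mp, nxt, seq ++ [mp.getD ch 0]))
    (PySem.Dict.empty, 0, [])).2.2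

def solve (N : Int) (words : List String) : Int :=
  let cnt : PySem.Dict (List Int) Int :=
    words.foldl (fun cnt w =>
      let key := pattern w
      cnt.insert key (cnt.getD key 0 + 1)) PySem.Dict.empty
  cnt.values.foldl (fun result c => result + PySem.Int.floordiv (c * (c - 1)) 2) 0

-- ===== PORT B =====
-- the `while rest:` loop of Source B: pop the head, scan the remainder for equal patterns
def pairCount : List (List Int) → Int → Int
  | [], result => result
  | head :: rest, result =>
      pairCount rest
        (rest.foldl (fun result q => if q == head then result + 1 else result) result)

def solve_alt (N : Int) (words : List String) : Int :=
  pairCount (words.map (fun w => pattern w)) 0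

-- ===== PRECONDITION & SPEC =====
def Spec_solve (N : Int) (words : List String) (out : Int) : Prop := out = solve_alt N words
instance (N : Int) (words : List String) (out : Int) : Decidable (Spec_solve N words out) := by unfold Spec_solve; infer_instance

-- ===== CLAIM (what is proved, stated in full; the proofs are below) =====
def Claim_equal_solve : Prop := ∀ (N : Int) (words : List String), Dom_solve N words → Spec_solve N words (solve N words)

-- ===== LEMMAS AND PROOFS =====

-- A's per-group summand c*(c-1)//2
def tri (c : Int) : Int := PySem.Int.floordiv (c * (c - 1)) 2

-- B's result, in structural form: for each head, the number of equal later patterns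
def psum : List (List Int) → Int
  | [] => 0
  | x :: xs => (xs.count x : Int) + psum xs

lemma tri_zero : tri 0 = 0 := by decide

lemma tri_succ (c : Int) : tri (c + 1) = tri c + c := by
  obtain ⟨k, hk⟩ : ∃ k, c * (c - 1) = 2 * k := by
    rcases Int.even_or_odd c with ⟨m, hm⟩ | ⟨m, hm⟩
    · exact ⟨m * (c - 1), by rw [hm]; ring⟩
    · exact ⟨c * m, by rw [hm]; ring⟩
  have h2 : (c + 1) * (c + 1 - 1) = 2 * (k + c) := by nlinarith [hk]
  simp only [tri, hk, h2, PySem.Int.floordiv]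
  rw [Int.mul_fdiv_cancel_left _ (by norm_num), Int.mul_fdiv_cancel_left _ (by norm_num)]

lemma foldl_count_eq (head : List Int) (rest : List (List Int)) (r : Int) :
    rest.foldl (fun result q => if q == head then result + 1 else result) r
      = r + (rest.count head : Int) := by
  induction rest generalizing r with
  | nil => simp
  | cons q rest ih =>
      simp only [List.foldl_cons]
      by_cases h : q = head
      · rw [if_pos (by simp [h]), ih, h, List.count_cons_self]
        push_cast; ring
      · rw [if_neg (by simp [h]), ih, List.count_cons_of_ne h]

lemma pairCount_eq (l : List (List Int)) (r : Int) : pairCount l r = r + psum l := by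
  induction l generalizing r with
  | nil => simp [pairCount, psum]
  | cons x xs ih =>
      simp only [pairCount, psum]
      rw [ih, foldl_count_eq]
      ring

lemma foldl_add_tri (xs : List Int) (r : Int) :
    xs.foldl (fun result c => result + PySem.Int.floordiv (c * (c - 1)) 2) r
      = r + (xs.map tri).sum := by
  induction xs generalizing r with
  | nil => simp
  | cons c xs ih => simp only [List.foldl_cons, List.map_cons, List.sum_cons]; rw [ih, tri]; ring

-- the heart: summing tri over the multiplicities equals counting equal pairs
lemma finset_sum_tri_eq_psum (l : List (List Int)) :
    (∑ k ∈ l.toFinset, tri (l.count k : Int)) = psum l := by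
  induction l with
  | nil => simp [psum]
  | cons a as ih =>
      by_cases ha : a ∈ as.toFinset
      · have hset : (a :: as).toFinset = as.toFinset := by
          simp [List.toFinset_cons, Finset.insert_eq_self.mpr ha]
        have hbody : ∀ b ∈ as.toFinset,
            tri (((a :: as).count b : Int))
              = tri ((as.count b : Int)) + (if b = a then (as.count a : Int) else 0) := by
          intro b _
          by_cases hb : b = a
          · subst hb
            rw [List.count_cons_self, if_pos rfl]
            push_cast
            rw [tri_succ]
          · rw [List.count_cons_of_ne (fun hc => hb hc.symm), if_neg hb, add_zero]
        rw [hset, Finset.sum_congr rfl hbody, Finset.sum_add_distrib,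
            Finset.sum_ite_eq' as.toFinset a (fun _ => (as.count a : Int)), if_pos ha, ih]
        simp only [psum]; ring
      · have hca : as.count a = 0 :=
          List.count_eq_zero.mpr (fun h => ha (List.mem_toFinset.mpr h))
        rw [List.toFinset_cons, Finset.sum_insert ha]
        have hhead : tri (((a :: as).count a : Int)) = 0 := by
          rw [List.count_cons_self, hca]
          exact tri_zero
        have hbody : ∀ b ∈ as.toFinset,
            tri (((a :: as).count b : Int)) = tri ((as.count b : Int)) := by
          intro b hb
          have hba : b ≠ a := fun h => ha (h ▸ hb)
          rw [List.count_cons_of_ne (fun hc => hba hc.symm)]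
        rw [hhead, Finset.sum_congr rfl hbody, ih]
        simp [psum, hca]

lemma dedup_sum_tri_eq_psum (l : List (List Int)) :
    ((PySem.List.dedup l).map (fun k => tri (l.count k : Int))).sum = psum l := by
  have hnd : (PySem.List.dedup l).Nodup := PySem.List.nodup_dedup l
  have hfs : (PySem.List.dedup l).toFinset = l.toFinset := by
    ext k; simp
  calc ((PySem.List.dedup l).map (fun k => tri (l.count k : Int))).sum
      = ∑ k ∈ (PySem.List.dedup l).toFinset, tri (l.count k : Int) :=
        (List.sum_toFinset _ hnd).symm
    _ = ∑ k ∈ l.toFinset, tri (l.count k : Int) := by rw [hfs]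
    _ = psum l := finset_sum_tri_eq_psum l

lemma solve_eq_sum (N : Int) (words : List String) :
    solve N words = psum (words.map (fun w => pattern w)) := by
  have hcnt : (words.foldl
        (fun cnt w => cnt.insert (pattern w) (cnt.getD (pattern w) 0 + 1))
        (PySem.Dict.empty : PySem.Dict (List Int) Int))
      = PySem.Dict.counter (words.map (fun w => pattern w)) := by
    rw [← PySem.Dict.foldl_insert_getD_add_one_eq_counter, List.foldl_map]
  have hvals : (PySem.Dict.counter (words.map (fun w => pattern w))).values
      = (PySem.List.dedup (words.map (fun w => pattern w))).map
          (fun k => ((words.map (fun w => pattern w)).count k : Int)) := by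
    simp [PySem.Dict.values, PySem.Dict.items_counter, List.map_map, Function.comp]
  show (words.foldl
        (fun cnt w => cnt.insert (pattern w) (cnt.getD (pattern w) 0 + 1))
        (PySem.Dict.empty : PySem.Dict (List Int) Int)).values.foldl
      (fun result c => result + PySem.Int.floordiv (c * (c - 1)) 2) 0
    = psum (words.map (fun w => pattern w))
  rw [hcnt, hvals, foldl_add_tri, List.map_map, zero_add]
  simpa [Function.comp] using dedup_sum_tri_eq_psum (words.map (fun w => pattern w))

-- ===== VERDICT (by name: the statement is the Claim_ definition above) =====
theorem solve_spec : Claim_equal_solve := by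
  intro N words _
  unfold Spec_solve solve_alt
  rw [pairCount_eq, solve_eq_sum]
  ring
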